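-- pv_equiv track=rewrite | github.com/yholics1226/algorithms | P42586.py | solution
-- ===== SOURCE A (Python) =====
-- import math
--
-- def solution(progresses, speeds):
--     answer = []
--     days = [math.ceil((100 - progresses[i])/speeds[i]) for i in range(len(progresses))]
--     cnt, day = 0, 1
--     for d in days:
--         if day < d:
--             if cnt != 0:
--                 answer.append(cnt)
--             day = d
--             cnt = 1
--         else:
--             cnt += 1
--     answer.append(cnt)
--     return answer
-- ===== SOURCE B (Python) =====
-- import math
--
--
-- def _rle(xs):
--     # run-length encode: lengths of maximal runs of equal consecutive values
--     if not xs: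
--         return []
--     run = 1
--     while run < len(xs) and xs[run] == xs[0]:
--         run += 1
--     return [run] + _rle(xs[run:])
--
--
-- def solution(progresses, speeds):
--     # running maximum (seeded with day 1) of the completion days, then run-lengths
--     leads = []
--     m = 1
--     for p, s in zip(progresses, speeds):
--         m = max(m, math.ceil((100 - p) / s))
--         leads.append(m)
--     return _rle(leads)
-- ===== Notes on version B (the rewrite author's own statement) =====
-- stated objective: alternative
-- what changed: B replaces A's single three-variable counting loop (current lead day, running group counter, flush-on-boundary with a final unconditional append) by two simple passes: build the running maximum of the finish days, then run-length-encode that list; the group sizes are exactly the run lengths.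
-- intended difference: On empty progresses A returns [0] (its unconditional final append of the leftover zero counter) while B returns [], the intended 'no deployments, no groups' answer. — e.g. on solution([], []): A returns [0], B returns []
import Mathlib
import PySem

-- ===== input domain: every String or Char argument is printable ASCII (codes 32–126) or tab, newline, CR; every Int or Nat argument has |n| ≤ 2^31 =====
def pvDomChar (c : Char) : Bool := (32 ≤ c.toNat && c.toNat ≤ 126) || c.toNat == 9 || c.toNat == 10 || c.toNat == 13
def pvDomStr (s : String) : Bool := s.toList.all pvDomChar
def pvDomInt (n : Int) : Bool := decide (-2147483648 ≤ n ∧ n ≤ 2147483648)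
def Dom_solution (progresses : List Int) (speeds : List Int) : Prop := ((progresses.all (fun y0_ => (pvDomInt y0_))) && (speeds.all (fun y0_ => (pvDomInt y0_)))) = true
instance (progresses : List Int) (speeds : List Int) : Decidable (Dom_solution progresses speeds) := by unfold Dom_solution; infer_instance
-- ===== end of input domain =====

-- B recomputes the groups as run-lengths of the running maximum of the finish days
-- (alternative decomposition: two simple passes instead of A's three-variable counting loop).

-- shared helper: math.ceil(a / b) for ints a, b; exact on Dom (|operands| ≤ 2^31 + 100 < 2^53,
-- so Python's correctly-rounded float division never crosses an integer boundary before ceil)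
def pvCeilDiv (a b : Int) : Int := -(PySem.Int.floordiv (-a) b)

-- ===== PORT A =====
def solution (progresses : List Int) (speeds : List Int) : List Int :=
  let days := (List.range progresses.length).map (fun (i : Nat) =>
    pvCeilDiv (100 - PySem.List.pyGetD progresses (i : Int) 0) (PySem.List.pyGetD speeds (i : Int) 0))
  let st := days.foldl (fun (st : List Int × Int × Int) d =>
    if st.2.2 < d then
      ((if st.2.1 ≠ 0 then st.1 ++ [st.2.1] else st.1), 1, d)
    else (st.1, st.2.1 + 1, st.2.2)) ([], 0, 1)
  st.1 ++ [st.2.1]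

-- ===== PORT B =====
-- length of the run of leading elements equal to v (B's inner while loop)
def pvCountRun (v : Int) : List Int → Nat
  | [] => 0
  | x :: xs => if x == v then pvCountRun v xs + 1 else 0

-- _rle from Source B
def pvRle : List Int → List Int
  | [] => []
  | v :: rest =>
    let k := pvCountRun v rest
    ((1 + k : Nat) : Int) :: pvRle (rest.drop k)
termination_by l => l.length
decreasing_by
  simp only [List.length_drop, List.length_cons]
  omega

def solution_alt (progresses : List Int) (speeds : List Int) : List Int :=
  let leads := ((progresses.zip speeds).foldl
    (fun (acc : List Int × Int) ps =>
      let m := max acc.2 (pvCeilDiv (100 - ps.1) ps.2)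
      (acc.1 ++ [m], m)) ([], 1)).1
  pvRle leads

-- ===== PRECONDITION & SPEC =====
-- Pre_: exactly where A returns: speeds must cover every progress index (else IndexError)
-- and none of the used speeds may be 0 (else ZeroDivisionError).
def Pre_solution (progresses : List Int) (speeds : List Int) : Prop :=
  progresses.length ≤ speeds.length ∧ ∀ s ∈ speeds.take progresses.length, s ≠ 0
instance (progresses : List Int) (speeds : List Int) : Decidable (Pre_solution progresses speeds) := by
  unfold Pre_solution; infer_instance
def pvWitness_solution : List Int × List Int := ([30, 55], [30, 5])

-- On empty input A returns [0] (its final unconditional append of the leftover counter 0);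
-- B returns [], the intended "no deployments, no groups" answer.
def D_solution (progresses : List Int) (speeds : List Int) : Prop := progresses = []
instance (progresses : List Int) (speeds : List Int) : Decidable (D_solution progresses speeds) := by
  unfold D_solution; infer_instance

def Spec_solution (progresses : List Int) (speeds : List Int) (out : List Int) : Prop :=
  ¬ D_solution progresses speeds → out = solution_alt progresses speeds
instance (progresses : List Int) (speeds : List Int) (out : List Int) : Decidable (Spec_solution progresses speeds out) := by
  unfold Spec_solution; infer_instance

def pvDiffWitness_solution : List Int × List Int := ([], [])
def pvDiffWitnessOut_solution : (List Int) × (List Int) := ([0], [])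

-- ===== CLAIM (what is proved, stated in full; the proofs are below) =====
def Claim_unchanged_solution : Prop := ∀ (progresses : List Int) (speeds : List Int), Dom_solution progresses speeds → Pre_solution progresses speeds → Spec_solution progresses speeds (solution progresses speeds)
def Claim_changed_solution : Prop := Dom_solution (pvDiffWitness_solution.1) (pvDiffWitness_solution.2) ∧ Pre_solution (pvDiffWitness_solution.1) (pvDiffWitness_solution.2) ∧ D_solution (pvDiffWitness_solution.1) (pvDiffWitness_solution.2) ∧ solution (pvDiffWitness_solution.1) (pvDiffWitness_solution.2) = pvDiffWitnessOut_solution.1 ∧ solution_alt (pvDiffWitness_solution.1) (pvDiffWitness_solution.2) = pvDiffWitnessOut_solution.2 ∧ pvDiffWitnessOut_solution.1 ≠ pvDiffWitnessOut_solution.2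
def Claim_exact_solution : Prop := ∀ (progresses : List Int) (speeds : List Int), Dom_solution progresses speeds → Pre_solution progresses speeds → D_solution progresses speeds → solution progresses speeds ≠ solution_alt progresses speeds

-- ===== LEMMAS AND PROOFS =====

-- the running-maximum list B builds (leads), as a recursive function
def leadsFrom (m : Int) : List Int → List Int
  | [] => []
  | d :: ds => (max m d) :: leadsFrom (max m d) ds

theorem foldB_leads (ds : List Int) : ∀ (ans : List Int) (m : Int),
    (ds.foldl (fun (acc : List Int × Int) d => (acc.1 ++ [max acc.2 d], max acc.2 d)) (ans, m)).1
      = ans ++ leadsFrom m ds := by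
  induction ds with
  | nil => intro ans m; simp [leadsFrom]
  | cons d ds ih => intro ans m; simp [List.foldl, leadsFrom, ih]

-- A's loop body, as a function of (cnt, day) and the remaining days, with the final append folded in
def gA (cnt day : Int) : List Int → List Int
  | [] => [cnt]
  | d :: ds => if day < d then (if cnt ≠ 0 then cnt :: gA 1 d ds else gA 1 d ds) else gA (cnt + 1) day ds

theorem foldA_gA (ds : List Int) : ∀ (ans : List Int) (cnt day : Int),
    (ds.foldl (fun (st : List Int × Int × Int) d =>
        if st.2.2 < d then
          ((if st.2.1 ≠ 0 then st.1 ++ [st.2.1] else st.1), 1, d)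
        else (st.1, st.2.1 + 1, st.2.2)) (ans, cnt, day)).1
      ++ [(ds.foldl (fun (st : List Int × Int × Int) d =>
        if st.2.2 < d then
          ((if st.2.1 ≠ 0 then st.1 ++ [st.2.1] else st.1), 1, d)
        else (st.1, st.2.1 + 1, st.2.2)) (ans, cnt, day)).2.1]
      = ans ++ gA cnt day ds := by
  induction ds with
  | nil => intro ans cnt day; simp [gA]
  | cons d ds ih =>
    intro ans cnt day
    simp only [List.foldl_cons, gA]
    split_ifs with h hc <;> rw [ih] <;> simp

-- the central correspondence: A's counting loop computes the run-lengths of the running maximum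
theorem gA_eq_rle (ds : List Int) : ∀ (v cnt : Int), 1 ≤ cnt →
    gA cnt v ds = (cnt + (pvCountRun v (leadsFrom v ds) : Int))
      :: pvRle ((leadsFrom v ds).drop (pvCountRun v (leadsFrom v ds))) := by
  induction ds with
  | nil => intro v cnt _; simp [gA, leadsFrom, pvCountRun, pvRle]
  | cons d ds ih =>
    intro v cnt hcnt
    by_cases h : v < d
    · have hmax : max v d = d := by omega
      have hne : (d == v) = false := by simp; omega
      have hc : cnt ≠ 0 := by omega
      simp only [gA, leadsFrom, hmax, pvCountRun, hne, if_pos h, Bool.false_eq_true, if_false,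
        if_pos hc, Nat.cast_zero, add_zero, List.drop_zero]
      rw [ih d 1 (by omega)]
      show _ = _ :: pvRle (_ :: _)
      rw [pvRle]
      push_cast
      simp
    · have hmax : max v d = v := by omega
      have heq : (v == v) = true := by simp
      simp only [gA, leadsFrom, hmax, pvCountRun, heq, if_neg h, if_true,
        List.drop_succ_cons]
      rw [ih v (cnt + 1) (by omega)]
      push_cast
      simp only [List.cons.injEq, and_true]
      ring

-- under Pre_'s length condition, A's index-based days list equals B's zip-based one
theorem days_eq (p s : List Int) (h : p.length ≤ s.length) :
    (List.range p.length).map (fun (i : Nat) =>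
        pvCeilDiv (100 - PySem.List.pyGetD p (i : Int) 0) (PySem.List.pyGetD s (i : Int) 0))
      = (p.zip s).map (fun ps => pvCeilDiv (100 - ps.1) ps.2) := by
  apply List.ext_getElem
  · simp only [List.length_map, List.length_range, List.length_zip]; omega
  · intro i h1 h2
    have hip : i < p.length := by simpa using h1
    have his : i < s.length := by omega
    simp [List.getElem_zip, PySem.List.pyGetD_natCast, hip, his]

-- ===== VERDICT (by name: the statement is the Claim_ definition above) =====
theorem solution_spec : Claim_unchanged_solution := by
  intro p s _hdom hpre hD
  have hlen : p.length ≤ s.length := hpre.1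
  have hne : p ≠ [] := hD
  unfold solution solution_alt
  simp only []
  rw [days_eq p s hlen]
  have hfold := foldB_leads ((p.zip s).map (fun ps => pvCeilDiv (100 - ps.1) ps.2)) [] 1
  rw [List.foldl_map] at hfold
  rw [hfold, List.nil_append]
  rw [foldA_gA _ [] 0 1, List.nil_append]
  obtain ⟨d, ds, hds⟩ : ∃ d ds, (p.zip s).map (fun ps => pvCeilDiv (100 - ps.1) ps.2) = d :: ds := by
    cases p with
    | nil => exact absurd rfl hne
    | cons a as =>
      cases s with
      | nil => simp at hlen
      | cons b bs => exact ⟨_, _, rfl⟩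
  rw [hds]
  have step1 : gA 0 1 (d :: ds) = gA 1 (max 1 d) ds := by
    by_cases h : (1 : Int) < d
    · have : max 1 d = d := by omega
      simp [gA, h, this]
    · have : max 1 d = 1 := by omega
      simp [gA, h, this]
  rw [step1, gA_eq_rle ds (max 1 d) 1 (by omega)]
  show _ = pvRle (leadsFrom 1 (d :: ds))
  rw [leadsFrom, pvRle]
  push_cast
  simp

theorem solution_changed : Claim_changed_solution := by
  unfold Claim_changed_solution
  refine ⟨by decide, by decide, by decide, by decide, ?_, by decide⟩
  simp [solution_alt, pvDiffWitness_solution, pvDiffWitnessOut_solution, pvRle]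

theorem solution_tight : Claim_exact_solution := by
  intro p s _hdom _hpre hD
  subst hD
  simp [solution, solution_alt, pvRle]
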